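-- pv_equiv track=rewrite | github.com/Slange-Mhath/Microservice-Log-Merger | helper.py | delete_keys_with_str_seq
-- ===== SOURCE A (Python) =====
-- def delete_keys_with_str_seq(log_dict, list_of_keys):
--     """
--     :param log_dict: takes a dict with the superficial keys
--     :param list_of_keys: takes a list of keys
--     :return: cleaned log_dict from the keys that matches the seq with*
--     """
--     if list_of_keys:
--         # This creates a list of wildcards from the list of keys
--         # This could possibly be an extra function
--         list_of_str_seq = [k for k in list_of_keys if k.endswith("*")]
--         # filters every key which ends of * and saves it to a list of str seqs
--         if list_of_str_seq:
--             for str_seq in list_of_str_seq: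
--                 for key in list(log_dict.keys()):
--                     if key.startswith(str_seq[:-1]):
--                         # this checks if the key in the log starts with the wildcard
--                         # sequence while ignoring the *
--                         key_to_delete = key
--                         del log_dict[key_to_delete]
--         return log_dict
-- ===== SOURCE B (Python) =====
-- def delete_keys_with_str_seq(log_dict, list_of_keys):
--     """Same return value as A, computed in one pass: build the set of wildcard
--     prefixes once, then keep each entry whose key has no prefix in that set.
--     (Unlike A, does not mutate log_dict in place; the return value is the same.)"""
--     if not list_of_keys:
--         return None
--     prefixes = {k[:-1] for k in list_of_keys if k.endswith("*")}
--     if not prefixes: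
--         return log_dict
--     return {k: v for k, v in log_dict.items()
--             if not any(k[:i] in prefixes for i in range(len(k) + 1))}
-- ===== Notes on version B (the rewrite author's own statement) =====
-- stated objective: alternative
-- what changed: B builds the set of wildcard prefixes once and filters the dict in a single pass, testing each key's own prefixes against that set, instead of A's per-wildcard rescan-and-delete over the whole dict; B does not mutate log_dict in place (return value is identical).
import Mathlib
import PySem

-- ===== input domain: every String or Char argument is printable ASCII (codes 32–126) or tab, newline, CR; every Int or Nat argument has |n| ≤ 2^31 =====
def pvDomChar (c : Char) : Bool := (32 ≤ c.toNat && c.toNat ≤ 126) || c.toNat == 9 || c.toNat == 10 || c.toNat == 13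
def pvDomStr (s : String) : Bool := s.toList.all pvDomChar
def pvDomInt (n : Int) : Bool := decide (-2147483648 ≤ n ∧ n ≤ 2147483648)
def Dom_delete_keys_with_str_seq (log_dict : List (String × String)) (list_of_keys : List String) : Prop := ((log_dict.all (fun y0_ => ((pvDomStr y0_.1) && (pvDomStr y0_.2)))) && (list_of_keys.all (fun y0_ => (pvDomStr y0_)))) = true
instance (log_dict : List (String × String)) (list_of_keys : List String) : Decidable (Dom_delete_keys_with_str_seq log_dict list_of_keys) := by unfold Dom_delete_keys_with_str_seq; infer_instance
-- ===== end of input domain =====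

-- ===== PORT A =====
-- B differs from A by building the wildcard-prefix set once and filtering the dict in a
-- single pass; A mutates log_dict in place, B builds a new dict — the RETURN value is what
-- is proved equal here.
def delete_keys_with_str_seq (log_dict : List (String × String)) (list_of_keys : List String) : Option (List (String × String)) :=
  if list_of_keys = [] then none
  else
    -- list_of_str_seq = [k for k in list_of_keys if k.endswith("*")]
    let list_of_str_seq := list_of_keys.filter (fun k => PySem.Str.endswith k "*")
    if list_of_str_seq = [] then some log_dict
    else
      -- for str_seq in list_of_str_seq: for key in list(log_dict.keys()): if key.startswith(str_seq[:-1]): del log_dict[key]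
      some (list_of_str_seq.foldl (fun d str_seq =>
        (d.map Prod.fst).foldl (fun e key =>
          if PySem.Str.startswith key (PySem.Str.slice str_seq none (some (-1))) then
            e.eraseP (fun q => q.1 == key)       -- del log_dict[key]
          else e) d) log_dict)

-- ===== PORT B =====
def delete_keys_with_str_seq_alt (log_dict : List (String × String)) (list_of_keys : List String) : Option (List (String × String)) :=
  if list_of_keys = [] then none
  else
    -- prefixes = {k[:-1] for k in list_of_keys if k.endswith("*")}
    let prefixes : PySem.Set String :=
      PySem.Set.ofList ((list_of_keys.filter (fun k => PySem.Str.endswith k "*")).map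
        (fun k => PySem.Str.slice k none (some (-1))))
    if prefixes = [] then some log_dict    -- if not prefixes: return log_dict
    else
    -- {k: v for k, v in log_dict.items() if not any(k[:i] in prefixes for i in range(len(k)+1))}
    some (log_dict.filter (fun p =>
      !((PySem.List.pyRange 0 (PySem.Str.len p.1 + 1) 1).any
          (fun i => PySem.Set.contains prefixes (PySem.Str.slice p.1 none (some i))))))
-- ===== PRECONDITION & SPEC =====
def Spec_delete_keys_with_str_seq (log_dict : List (String × String)) (list_of_keys : List String) (out : Option (List (String × String))) : Prop := out = delete_keys_with_str_seq_alt log_dict list_of_keys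
instance (log_dict : List (String × String)) (list_of_keys : List String) (out : Option (List (String × String))) : Decidable (Spec_delete_keys_with_str_seq log_dict list_of_keys out) := by unfold Spec_delete_keys_with_str_seq; infer_instance

-- ===== CLAIM (what is proved, stated in full; the proofs are below) =====
def Claim_equal_delete_keys_with_str_seq : Prop := ∀ (log_dict : List (String × String)) (list_of_keys : List String), Dom_delete_keys_with_str_seq log_dict list_of_keys → Spec_delete_keys_with_str_seq log_dict list_of_keys (delete_keys_with_str_seq log_dict list_of_keys)

-- ===== LEMMAS AND PROOFS =====

-- a pair whose key the predicate does not match passes unchanged through A's deletion loop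
theorem pv_push (m : String → Bool) (p : String × String) (hp : m p.1 = false) :
    ∀ (ks : List String) (e : List (String × String)),
      ks.foldl (fun e key => if m key then e.eraseP (fun q => q.1 == key) else e) (p :: e)
      = p :: ks.foldl (fun e key => if m key then e.eraseP (fun q => q.1 == key) else e) e := by
  intro ks
  induction ks with
  | nil => intro e; rfl
  | cons k ks ih =>
    intro e
    simp only [List.foldl_cons]
    by_cases h : m k = true
    · have hne : (p.1 == k) = false := by
        by_contra hc
        simp only [Bool.not_eq_false, beq_iff_eq] at hc
        rw [hc] at hp; rw [hp] at h; exact Bool.false_ne_true h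
      simp only [h, if_true, List.eraseP_cons, hne, Bool.cond_false]
      exact ih _
    · simp only [Bool.not_eq_true] at h
      simp only [h, Bool.false_eq_true, if_false]
      exact ih _

-- A's inner loop (snapshot keys, delete matches) IS a filter
theorem pv_inner (m : String → Bool) :
    ∀ (d : List (String × String)),
      (d.map Prod.fst).foldl (fun e key => if m key then e.eraseP (fun q => q.1 == key) else e) d
      = d.filter (fun p => !(m p.1)) := by
  intro d
  induction d with
  | nil => rfl
  | cons p rest ih =>
    simp only [List.map_cons, List.foldl_cons]
    by_cases h : m p.1 = true
    · simp only [h, if_true, List.eraseP_cons, beq_self_eq_true, Bool.cond_true,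
        List.filter_cons, Bool.not_true, Bool.false_eq_true, if_false]
      exact ih
    · simp only [Bool.not_eq_true] at h
      simp only [h, Bool.false_eq_true, if_false, List.filter_cons, Bool.not_false, if_true]
      rw [pv_push m p h]
      exact congrArg (p :: ·) ih

-- A's outer loop over the wildcard list is a single filter by "no wildcard matches"
theorem pv_outer (m2 : String → String → Bool) :
    ∀ (seqs : List String) (d : List (String × String)),
      seqs.foldl (fun d s => d.filter (fun p => !(m2 s p.1))) d
      = d.filter (fun p => seqs.all (fun s => !(m2 s p.1))) := by
  intro seqs
  induction seqs with
  | nil => intro d; simp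
  | cons s seqs ih =>
    intro d
    simp only [List.foldl_cons]
    rw [ih, List.filter_filter]
    simp [List.all_cons, Bool.and_comm]

-- pointwise: "some wildcard prefix matches k" = "some prefix of k is in the prefix set"
theorem pv_point (k : String) (pres : List String) :
    (pres.any (fun p => PySem.Str.startswith k p))
    = ((PySem.List.pyRange 0 (PySem.Str.len k + 1) 1).any
        (fun i => PySem.Set.contains (PySem.Set.ofList pres) (PySem.Str.slice k none (some i)))) := by
  rw [Bool.eq_iff_iff]
  simp only [List.any_eq_true, PySem.Set.contains_iff, PySem.Set.mem_ofList,
    PySem.List.mem_pyRange_one, PySem.Str.startswith_eq]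
  constructor
  · rintro ⟨p, hp, hsw⟩
    rw [PySem.Chars.startswith_iff] at hsw
    refine ⟨(p.toList.length : Int), ⟨by positivity, ?_⟩, ?_⟩
    · have := hsw.length_le
      rw [PySem.Str.len_eq]
      omega
    · have hps : PySem.Str.slice k none (some ((p.toList.length : Nat) : Int)) = p := by
        apply String.toList_inj.mp
        rw [PySem.Str.toList_slice]
        simp only [PySem.Chars.slice_eq_listSlice]
        rw [PySem.List.slice_to k.toList (by positivity)]
        rw [Int.toNat_natCast]
        exact (List.prefix_iff_eq_take.mp hsw).symm
      rw [hps]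
      exact hp
  · rintro ⟨i, ⟨h0, _⟩, hp⟩
    refine ⟨PySem.Str.slice k none (some i), hp, ?_⟩
    rw [PySem.Chars.startswith_iff, PySem.Str.toList_slice]
    simp only [PySem.Chars.slice_eq_listSlice]
    rw [PySem.List.slice_to k.toList h0]
    exact List.take_prefix _ _

theorem pv_main : ∀ (log_dict : List (String × String)) (list_of_keys : List String),
    delete_keys_with_str_seq log_dict list_of_keys
    = delete_keys_with_str_seq_alt log_dict list_of_keys := by
  intro d ks
  unfold delete_keys_with_str_seq delete_keys_with_str_seq_alt
  by_cases hks : ks = []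
  · simp [hks]
  · simp only [hks, if_false]
    set seqs := ks.filter (fun k => PySem.Str.endswith k "*") with hseqs
    set pre : String → String := fun s => PySem.Str.slice s none (some (-1)) with hpre
    have hpt : ∀ kk : String,
        (seqs.all (fun s => !(PySem.Str.startswith kk (PySem.Str.slice s none (some (-1))))))
        = !((PySem.List.pyRange 0 (PySem.Str.len kk + 1) 1).any
            (fun i => PySem.Set.contains (PySem.Set.ofList (seqs.map pre))
              (PySem.Str.slice kk none (some i)))) := by
      intro kk
      rw [← pv_point kk (seqs.map pre)]
      rw [Bool.eq_iff_iff]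
      simp only [List.all_eq_true, Bool.not_eq_true', List.any_map, Bool.not_eq_true,
        List.any_eq_false, Function.comp, hpre]
    have hfold : ∀ d0 : List (String × String),
        seqs.foldl (fun dd str_seq =>
          (dd.map Prod.fst).foldl (fun e key =>
            if PySem.Str.startswith key (PySem.Str.slice str_seq none (some (-1))) then
              e.eraseP (fun q => q.1 == key)
            else e) dd) d0
        = d0.filter (fun p =>
            !((PySem.List.pyRange 0 (PySem.Str.len p.1 + 1) 1).any
                (fun i => PySem.Set.contains (PySem.Set.ofList (seqs.map pre))
                  (PySem.Str.slice p.1 none (some i))))) := by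
      intro d0
      have h1 : (fun (dd : List (String × String)) (str_seq : String) =>
          (dd.map Prod.fst).foldl (fun e key =>
            if PySem.Str.startswith key (PySem.Str.slice str_seq none (some (-1))) then
              e.eraseP (fun q => q.1 == key)
            else e) dd)
          = (fun dd str_seq => dd.filter (fun p =>
              !(PySem.Str.startswith p.1 (PySem.Str.slice str_seq none (some (-1)))))) := by
        funext dd str_seq
        exact pv_inner (fun key => PySem.Str.startswith key (PySem.Str.slice str_seq none (some (-1)))) dd
      rw [h1, pv_outer (fun s kk => PySem.Str.startswith kk (PySem.Str.slice s none (some (-1)))) seqs d0]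
      exact List.filter_congr (fun p _ => hpt p.1)
    by_cases hs : seqs = []
    · rw [if_pos hs, hs]
      simp only [List.map_nil]
      rfl
    · have hne : PySem.Set.ofList (seqs.map pre) ≠ ([] : List String) := by
        cases hmp : seqs.map pre with
        | nil => exact absurd (List.map_eq_nil_iff.mp hmp) hs
        | cons y ys =>
          intro hc
          have hy : y ∈ PySem.Set.ofList (y :: ys) :=
            (PySem.Set.mem_ofList _ _).mpr List.mem_cons_self
          rw [hc] at hy
          exact List.not_mem_nil hy
      rw [if_neg hs]
      rw [hfold d]
      rw [if_neg (by simpa [hseqs.symm, hpre.symm] using hne)]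

-- ===== VERDICT (by name: the statement is the Claim_ definition above) =====
theorem delete_keys_with_str_seq_spec : Claim_equal_delete_keys_with_str_seq := by
  intro d ks _
  unfold Spec_delete_keys_with_str_seq
  exact pv_main d ks
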